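-- pv_equiv track=rewrite | github.com/missaelcorm/FCC-Toolkit | main.py | lookForSimpleOperators
-- ===== SOURCE A (Python) =====
-- def lookForSimpleOperators(listExp):
--
--     while(('^' in listExp) or ('v' in listExp) or ('~' in listExp)):
--         if '^' in listExp:
--             listExp.insert(listExp.index('^'), 'and')
--             listExp.remove('^')
--         elif 'v' in listExp:
--             listExp.insert(listExp.index('v'), 'or')
--             listExp.remove('v')
--         elif '~' in listExp:
--             listExp.insert(listExp.index('~'), 'not')
--             listExp.remove('~')
--
--     return listExp
-- ===== SOURCE B (Python) =====
-- def lookForSimpleOperators(listExp):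
--     for i, x in enumerate(listExp):
--         if x == '^':
--             listExp[i] = 'and'
--         elif x == 'v':
--             listExp[i] = 'or'
--         elif x == '~':
--             listExp[i] = 'not'
--     return listExp
-- ===== Notes on version B (the rewrite author's own statement) =====
-- stated objective: alternative
-- what changed: A repeatedly rescans the whole list (in/index/insert/remove) once per symbol occurrence; B makes one enumerate pass and overwrites each symbol in place by index assignment.
import Mathlib
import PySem

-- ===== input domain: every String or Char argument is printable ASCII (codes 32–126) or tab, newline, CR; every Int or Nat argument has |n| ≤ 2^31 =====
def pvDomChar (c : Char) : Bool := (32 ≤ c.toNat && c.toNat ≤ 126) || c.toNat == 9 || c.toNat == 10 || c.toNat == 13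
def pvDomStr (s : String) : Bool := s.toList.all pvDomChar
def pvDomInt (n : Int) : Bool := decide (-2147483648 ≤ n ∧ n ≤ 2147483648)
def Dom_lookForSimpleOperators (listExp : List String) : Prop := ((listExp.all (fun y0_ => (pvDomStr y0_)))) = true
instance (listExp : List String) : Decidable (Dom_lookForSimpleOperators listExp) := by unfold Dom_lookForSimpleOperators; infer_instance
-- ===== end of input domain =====

-- B replaces A's repeated-rescan while loop (in/index/insert/remove) by one in-place
-- enumerate pass; return value proved equal, and both mutate the argument in Python.

-- ===== PORT A =====
-- A-side helpers: one body iteration 'listExp.insert(listExp.index(c), w); listExp.remove(c)'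
def pyStep (l : List String) (c w : String) : List String :=
  let i : Nat := (PySem.List.index? l c).getD 0
  let l1 := PySem.List.insert l (i : Int) w
  (PySem.List.remove? l1 c).getD l1

-- proof-side characterisation of one iteration, needed by the port's decreasing_by
def replaceFirst (c w : String) : List String → List String
  | [] => []
  | x :: xs => if x = c then w :: xs else x :: replaceFirst c w xs

def scount (l : List String) : Nat := l.count "^" + l.count "v" + l.count "~"

theorem rf_cons_self (c w : String) (xs : List String) :
    replaceFirst c w (c :: xs) = w :: xs := by simp [replaceFirst]

theorem rf_cons_ne (c w x : String) (xs : List String) (hx : x ≠ c) :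
    replaceFirst c w (x :: xs) = x :: replaceFirst c w xs := by simp [replaceFirst, hx]

theorem pyStep_eq (l : List String) (c w : String) (hw : w ≠ c) (h : c ∈ l) :
    pyStep l c w = replaceFirst c w l := by
  induction l with
  | nil => cases h
  | cons x xs ih =>
    by_cases hx : x = c
    · subst hx
      have hi : PySem.List.index? (x :: xs) x = some 0 := PySem.List.index?_cons_self x xs
      simp only [pyStep, hi, Option.getD_some, Nat.cast_zero, PySem.List.insert_zero]
      rw [PySem.List.remove?_cons_of_ne _ hw]
      simp [replaceFirst]
    · have hmem : c ∈ xs := by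
        rcases List.mem_cons.mp h with h' | h'
        · exact absurd h'.symm hx
        · exact h'
      obtain ⟨i, hi⟩ := Option.isSome_iff_exists.mp
        ((PySem.List.index?_isSome_iff xs c).mpr hmem)
      obtain ⟨hilt, -, -⟩ := PySem.List.getElem_of_index?_eq_some hi
      have hi' : PySem.List.index? (x :: xs) c = some (i + 1) := by
        rw [PySem.List.index?_cons_of_ne xs hx, hi]; rfl
      have hins : PySem.List.insert (x :: xs) ((i + 1 : Nat) : Int) w
          = x :: PySem.List.insert xs ((i : Nat) : Int) w := by
        rw [PySem.List.insert_natCast _ _ _ (by simpa using Nat.succ_le_succ (Nat.le_of_lt hilt)),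
            PySem.List.insert_natCast _ _ _ (Nat.le_of_lt hilt)]
        simp
      have hcmem : c ∈ PySem.List.insert xs ((i : Nat) : Int) w := by
        rw [PySem.List.insert_natCast _ _ _ (Nat.le_of_lt hilt)]
        have hsp : c ∈ xs.take i ++ xs.drop i := by simpa using hmem
        rcases List.mem_append.mp hsp with h' | h'
        · exact List.mem_append.mpr (Or.inl h')
        · exact List.mem_append.mpr (Or.inr (List.mem_cons_of_mem _ h'))
      have hsome : (PySem.List.remove? (PySem.List.insert xs ((i : Nat) : Int) w) c).isSome := by
        by_cases hs : (PySem.List.remove? (PySem.List.insert xs ((i : Nat) : Int) w) c).isSome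
        · exact hs
        · exact absurd (PySem.List.remove?_eq_none_iff _ _ |>.mp
            (Option.not_isSome_iff_eq_none.mp hs)) (by simp [hcmem])
      obtain ⟨r, hr⟩ := Option.isSome_iff_exists.mp hsome
      have hxs : pyStep xs c w = r := by
        simp only [pyStep, hi, Option.getD_some, hr, Option.getD_some]
      simp only [pyStep, hi', Option.getD_some, hins]
      rw [PySem.List.remove?_cons_of_ne _ hx, hr]
      simp only [Option.map_some, Option.getD_some]
      rw [rf_cons_ne c w x xs hx, ← ih hmem, hxs]

theorem count_rf_le (c w d : String) (hd : d ≠ w) (l : List String) :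
    (replaceFirst c w l).count d ≤ l.count d := by
  induction l with
  | nil => simp [replaceFirst]
  | cons x xs ih =>
    by_cases hx : x = c
    · subst hx
      have hwd : (w == d) = false := by simpa using fun he => hd he.symm
      have e1 : (w :: xs).count d = xs.count d := by simp [List.count_cons, hwd]
      rw [rf_cons_self, e1, List.count_cons]
      exact Nat.le_add_right _ _
    · rw [rf_cons_ne c w x xs hx, List.count_cons, List.count_cons]
      exact Nat.add_le_add ih le_rfl

theorem count_rf_lt (c w : String) (hw : w ≠ c) (l : List String) (h : c ∈ l) :
    (replaceFirst c w l).count c < l.count c := by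
  induction l with
  | nil => cases h
  | cons x xs ih =>
    by_cases hx : x = c
    · subst hx
      have hwc : (w == x) = false := by simpa using hw
      have e1 : (w :: xs).count x = xs.count x := by simp [List.count_cons, hwc]
      have e2 : (x :: xs).count x = xs.count x + 1 := by simp [List.count_cons]
      rw [rf_cons_self, e1, e2]
      exact Nat.lt_succ_self _
    · have hmem : c ∈ xs := by
        rcases List.mem_cons.mp h with h' | h'
        · exact absurd h'.symm hx
        · exact h'
      rw [rf_cons_ne c w x xs hx, List.count_cons, List.count_cons]
      exact Nat.add_lt_add_right (ih hmem) _

theorem scount_rf (c w : String) (hc : c = "^" ∨ c = "v" ∨ c = "~")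
    (hw : w = "and" ∨ w = "or" ∨ w = "not") (l : List String) (h : c ∈ l) :
    scount (replaceFirst c w l) < scount l := by
  have hwc : w ≠ c := by rcases hw with h1 | h1 | h1 <;> rcases hc with h2 | h2 | h2 <;> simp [h1, h2]
  have hlt := count_rf_lt c w hwc l h
  have hv : w ≠ "^" ∧ w ≠ "v" ∧ w ≠ "~" := by
    rcases hw with h1 | h1 | h1 <;> simp [h1]
  have l1 := count_rf_le c w "^" (Ne.symm hv.1) l
  have l2 := count_rf_le c w "v" (Ne.symm hv.2.1) l
  have l3 := count_rf_le c w "~" (Ne.symm hv.2.2) l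
  unfold scount
  rcases hc with h2 | h2 | h2 <;> subst h2 <;> omega

theorem scount_pyStep (c w : String) (hc : c = "^" ∨ c = "v" ∨ c = "~")
    (hw : w = "and" ∨ w = "or" ∨ w = "not") (l : List String) (h : l.contains c = true) :
    scount (pyStep l c w) < scount l := by
  have hmem : c ∈ l := by simpa using h
  have hwc : w ≠ c := by rcases hw with h1 | h1 | h1 <;> rcases hc with h2 | h2 | h2 <;> simp [h1, h2]
  rw [pyStep_eq l c w hwc hmem]
  exact scount_rf c w hc hw l hmem

-- literal port of A's while loop: test the three memberships, rewrite the first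
-- matching symbol via insert/remove (pyStep), loop
def lookForSimpleOperators (listExp : List String) : List String :=
  if listExp.contains "^" || listExp.contains "v" || listExp.contains "~" then
    if h1 : listExp.contains "^" then
      lookForSimpleOperators (pyStep listExp "^" "and")
    else if h2 : listExp.contains "v" then
      lookForSimpleOperators (pyStep listExp "v" "or")
    else if h3 : listExp.contains "~" then
      lookForSimpleOperators (pyStep listExp "~" "not")
    else listExp
  else listExp
termination_by scount listExp
decreasing_by
  · exact scount_pyStep "^" "and" (Or.inl rfl) (Or.inl rfl) listExp h1
  · exact scount_pyStep "v" "or" (Or.inr (Or.inl rfl)) (Or.inr (Or.inl rfl)) listExp h2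
  · exact scount_pyStep "~" "not" (Or.inr (Or.inr rfl)) (Or.inr (Or.inr rfl)) listExp h3

-- ===== PORT B =====
-- one enumerate pass; each symbol is overwritten in place by index assignment
def lookForSimpleOperators_alt (listExp : List String) : List String :=
  (PySem.List.enumerate listExp).foldl
    (fun acc p =>
      if p.2 = "^" then acc.set p.1.toNat "and"
      else if p.2 = "v" then acc.set p.1.toNat "or"
      else if p.2 = "~" then acc.set p.1.toNat "not"
      else acc)
    listExp

-- ===== PRECONDITION & SPEC =====
def Spec_lookForSimpleOperators (listExp : List String) (out : List String) : Prop := out = lookForSimpleOperators_alt listExp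
instance (listExp : List String) (out : List String) : Decidable (Spec_lookForSimpleOperators listExp out) := by unfold Spec_lookForSimpleOperators; infer_instance

-- ===== CLAIM (what is proved, stated in full; the proofs are below) =====
def Claim_equal_lookForSimpleOperators : Prop := ∀ (listExp : List String), Dom_lookForSimpleOperators listExp → Spec_lookForSimpleOperators listExp (lookForSimpleOperators listExp)

-- ===== LEMMAS AND PROOFS =====
def repWord (s : String) : String :=
  if s = "^" then "and" else if s = "v" then "or" else if s = "~" then "not" else s

theorem map_rf (c w : String) (hfc : repWord c = w) (hfw : repWord w = w) (l : List String) :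
    (replaceFirst c w l).map repWord = l.map repWord := by
  induction l with
  | nil => rfl
  | cons x xs ih =>
    by_cases hx : x = c
    · subst hx
      simp [replaceFirst, hfc, hfw]
    · simp [replaceFirst, if_neg hx, ih]

theorem map_repWord_id (l : List String) (h1 : l.contains "^" = false)
    (h2 : l.contains "v" = false) (h3 : l.contains "~" = false) :
    l.map repWord = l := by
  induction l with
  | nil => rfl
  | cons x xs ih =>
    simp only [List.contains_cons, Bool.or_eq_false_iff] at h1 h2 h3
    have hx1 : x ≠ "^" := Ne.symm (by simpa using h1.1)
    have hx2 : x ≠ "v" := Ne.symm (by simpa using h2.1)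
    have hx3 : x ≠ "~" := Ne.symm (by simpa using h3.1)
    simp [repWord, hx1, hx2, hx3, ih h1.2 h2.2 h3.2]

theorem A_eq_map (l : List String) : lookForSimpleOperators l = l.map repWord := by
  have key : ∀ n l, scount l ≤ n → lookForSimpleOperators l = List.map repWord l := by
    intro n
    induction n with
    | zero =>
      intro l hl
      have h1 : l.contains "^" = false := by
        by_contra hc
        have : "^" ∈ l := by simpa using Bool.of_not_eq_false hc
        have := List.count_pos_iff.mpr this
        unfold scount at hl; omega
      have h2 : l.contains "v" = false := by
        by_contra hc
        have : "v" ∈ l := by simpa using Bool.of_not_eq_false hc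
        have := List.count_pos_iff.mpr this
        unfold scount at hl; omega
      have h3 : l.contains "~" = false := by
        by_contra hc
        have : "~" ∈ l := by simpa using Bool.of_not_eq_false hc
        have := List.count_pos_iff.mpr this
        unfold scount at hl; omega
      rw [lookForSimpleOperators, if_neg (by simp only [h1, h2, h3]; decide),
          map_repWord_id l h1 h2 h3]
    | succ n ih =>
      intro l hl
      rw [lookForSimpleOperators]
      by_cases h1 : l.contains "^" = true
      · have hmem : "^" ∈ l := by simpa using h1
        have hdec := scount_pyStep "^" "and" (Or.inl rfl) (Or.inl rfl) l h1
        rw [if_pos (by simp only [h1, Bool.true_or]), dif_pos h1,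
            ih _ (by omega), pyStep_eq l "^" "and" (by decide) hmem,
            map_rf "^" "and" (by decide) (by decide)]
      · by_cases h2 : l.contains "v" = true
        · have hmem : "v" ∈ l := by simpa using h2
          have hdec := scount_pyStep "v" "or" (Or.inr (Or.inl rfl)) (Or.inr (Or.inl rfl)) l h2
          rw [if_pos (by simp only [h2, Bool.true_or, Bool.or_true]), dif_neg h1, dif_pos h2,
              ih _ (by omega), pyStep_eq l "v" "or" (by decide) hmem,
              map_rf "v" "or" (by decide) (by decide)]
        · by_cases h3 : l.contains "~" = true
          · have hmem : "~" ∈ l := by simpa using h3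
            have hdec := scount_pyStep "~" "not" (Or.inr (Or.inr rfl)) (Or.inr (Or.inr rfl)) l h3
            rw [if_pos (by simp only [h3, Bool.or_true]), dif_neg h1, dif_neg h2, dif_pos h3,
                ih _ (by omega), pyStep_eq l "~" "not" (by decide) hmem,
                map_rf "~" "not" (by decide) (by decide)]
          · have e1 : l.contains "^" = false := by simpa using h1
            have e2 : l.contains "v" = false := by simpa using h2
            have e3 : l.contains "~" = false := by simpa using h3
            rw [if_neg (by simp only [e1, e2, e3]; decide), map_repWord_id l e1 e2 e3]
  exact key (scount l) l (Nat.le_refl _)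

theorem B_fold_eq (l : List String) : ∀ (pre : List String),
    (PySem.List.enumerate l (pre.length : Int)).foldl
      (fun acc p =>
        if p.2 = "^" then acc.set p.1.toNat "and"
        else if p.2 = "v" then acc.set p.1.toNat "or"
        else if p.2 = "~" then acc.set p.1.toNat "not"
        else acc)
      (pre ++ l) = pre ++ l.map repWord := by
  induction l with
  | nil => intro pre; simp [PySem.List.enumerate_nil]
  | cons x xs ih =>
    intro pre
    rw [PySem.List.enumerate_cons, List.foldl_cons]
    have hset : ∀ w : String, (pre ++ x :: xs).set ((pre.length : Int)).toNat w
        = (pre ++ [w]) ++ xs := by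
      intro w
      rw [Int.toNat_natCast, List.set_append]
      simp
    have hstep : (pre.length : Int) + 1 = ((pre ++ [repWord x]).length : Int) := by
      simp
    by_cases hx1 : x = "^"
    · subst hx1
      simp only [hset, if_true, eq_self_iff_true, reduceIte]
      rw [show ((pre.length : Int) + 1) = ((pre ++ [("and" : String)]).length : Int) by simp,
          ih (pre ++ ["and"])]
      simp [repWord]
    · by_cases hx2 : x = "v"
      · subst hx2
        simp only [hset, if_true, if_neg hx1]
        rw [show ((pre.length : Int) + 1) = ((pre ++ [("or" : String)]).length : Int) by simp,
            ih (pre ++ ["or"])]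
        simp [repWord]
      · by_cases hx3 : x = "~"
        · subst hx3
          simp only [hset, if_true, if_neg hx1, if_neg hx2]
          rw [show ((pre.length : Int) + 1) = ((pre ++ [("not" : String)]).length : Int) by simp,
              ih (pre ++ ["not"])]
          simp [repWord]
        · simp only [if_neg hx1, if_neg hx2, if_neg hx3]
          have hax : pre ++ x :: xs = (pre ++ [x]) ++ xs := by simp
          rw [hax, show ((pre.length : Int) + 1) = ((pre ++ [x]).length : Int) by simp,
              ih (pre ++ [x])]
          simp [repWord, hx1, hx2, hx3]

theorem B_eq_map (l : List String) : lookForSimpleOperators_alt l = l.map repWord := by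
  unfold lookForSimpleOperators_alt
  have := B_fold_eq l []
  simpa using this

-- ===== VERDICT (by name: the statement is the Claim_ definition above) =====
theorem lookForSimpleOperators_spec : Claim_equal_lookForSimpleOperators := by
  intro l _
  unfold Spec_lookForSimpleOperators
  rw [A_eq_map, B_eq_map]
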